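-- pv_equiv track=rewrite | github.com/Richicinschi/python-oop-journey | python-oop-journey-v2/week00_getting_started/solutions/day11/problem_02_print_pattern.py | print_pattern
-- ===== SOURCE A (Python) =====
-- def print_pattern(n: int) -> list[str]:
--     """Generate a triangle pattern of asterisks.
--
--     Args:
--         n: Number of rows
--
--     Returns:
--         List of strings, each containing asterisks for that row
--     """
--     result: list[str] = []
--     for i in range(1, n + 1):
--         row = ""
--         for j in range(i):
--             row += "*"
--         result.append(row)
--     return result
-- ===== SOURCE B (Python) =====
-- def print_pattern(n: int) -> list[str]:
--     """Generate a triangle pattern of asterisks.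
--
--     Single accumulating pass: carries the previous row forward and adds one
--     asterisk per iteration instead of rebuilding each row with an inner loop.
--     """
--     result: list[str] = []
--     row = ""
--     for _ in range(1, n + 1):
--         row += "*"
--         result.append(row)
--     return result
-- ===== Notes on version B (the rewrite author's own statement) =====
-- stated objective: simpler
-- what changed: Replaces the nested loop that rebuilds each row character by character with a single pass that carries the previous row string forward and appends one asterisk per iteration.
import Mathlib
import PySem

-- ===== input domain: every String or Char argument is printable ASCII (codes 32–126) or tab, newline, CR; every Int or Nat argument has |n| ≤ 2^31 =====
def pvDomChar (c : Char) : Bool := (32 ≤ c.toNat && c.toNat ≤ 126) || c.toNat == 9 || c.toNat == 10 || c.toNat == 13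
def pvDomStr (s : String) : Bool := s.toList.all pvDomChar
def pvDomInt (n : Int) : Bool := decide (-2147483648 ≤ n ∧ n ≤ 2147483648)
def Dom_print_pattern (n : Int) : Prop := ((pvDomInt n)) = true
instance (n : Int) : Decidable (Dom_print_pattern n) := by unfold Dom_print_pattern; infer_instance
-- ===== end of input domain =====

-- B replaces A's nested row-rebuilding loop with a single accumulating pass that
-- carries the previous row forward, appending one asterisk per iteration.


-- ===== PORT A =====
-- for i in range(1, n+1): row = ""; for j in range(i): row += "*"; result.append(row)
def print_pattern (n : Int) : List String :=
  (PySem.List.pyRange 1 (n + 1) 1).foldl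
    (fun result i =>
      result ++ [(PySem.List.pyRange 0 i 1).foldl (fun row _ => row ++ "*") ""])
    []

-- ===== PORT B =====
-- row = ""; for _ in range(1, n+1): row += "*"; result.append(row)
def print_pattern_alt (n : Int) : List String :=
  ((PySem.List.pyRange 1 (n + 1) 1).foldl
    (fun (st : String × List String) _ =>
      let row := st.1 ++ "*"
      (row, st.2 ++ [row]))
    ("", [])).2

-- ===== PRECONDITION & SPEC =====
def Spec_print_pattern (n : Int) (out : List String) : Prop := out = print_pattern_alt n
instance (n : Int) (out : List String) : Decidable (Spec_print_pattern n out) := by unfold Spec_print_pattern; infer_instance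

-- ===== CLAIM (what is proved, stated in full; the proofs are below) =====
def Claim_equal_print_pattern : Prop := ∀ (n : Int), Dom_print_pattern n → Spec_print_pattern n (print_pattern n)

-- ===== LEMMAS AND PROOFS =====

/-- A row of `k` asterisks. -/
def pvStars (k : Nat) : String := String.ofList (List.replicate k '*')

theorem pvStars_zero : pvStars 0 = "" := rfl

theorem pvStars_push (j : Nat) : pvStars j ++ "*" = pvStars (j + 1) := by
  apply String.toList_inj.mp
  simp [pvStars, List.replicate_succ']

theorem pvInner_fold (l : List Int) (s : String) :
    l.foldl (fun row _ => row ++ "*") s = s ++ pvStars l.length := by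
  induction l generalizing s with
  | nil => simp [pvStars_zero]
  | cons x xs ih =>
      simp only [List.foldl_cons, ih, List.length_cons]
      apply String.toList_inj.mp
      simp [pvStars, List.replicate_succ]

theorem pvA_eq (n : Int) :
    print_pattern n = (List.range n.toNat).map (fun k => pvStars (k + 1)) := by
  unfold print_pattern
  rw [PySem.List.foldl_append_singleton_eq_map, PySem.List.pyRange_one]
  simp only [pvInner_fold, PySem.List.length_pyRange_one, List.map_map, List.nil_append]
  have h1 : ((n + 1 : Int) - 1).toNat = n.toNat := by omega
  rw [h1]
  apply List.map_congr_left
  intro k _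
  simp only [Function.comp]
  have h2 : ((1 : Int) + ↑k - 0).toNat = k + 1 := by omega
  rw [h2]
  simp

theorem pvB_inv (l : List Int) (j : Nat) (acc : List String) :
    (l.foldl (fun (st : String × List String) _ =>
        let row := st.1 ++ "*"
        (row, st.2 ++ [row])) (pvStars j, acc)).2
      = acc ++ (List.range l.length).map (fun k => pvStars (j + k + 1)) := by
  induction l generalizing j acc with
  | nil => simp
  | cons x xs ih =>
      simp only [List.foldl_cons, List.length_cons, pvStars_push]
      rw [ih]
      have hmap : List.map (fun k => pvStars (j + k + 1)) (List.range (xs.length + 1))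
          = pvStars (j + 1) :: List.map (fun k => pvStars (j + 1 + k + 1)) (List.range xs.length) := by
        rw [List.range_succ_eq_map]
        simp only [List.map_cons, List.map_map, Function.comp_def, Nat.add_zero]
        congr 1
        apply List.map_congr_left
        intro k _
        congr 1
        omega
      rw [hmap, List.append_assoc, List.singleton_append]

theorem pvB_eq (n : Int) :
    print_pattern_alt n = (List.range n.toNat).map (fun k => pvStars (k + 1)) := by
  unfold print_pattern_alt
  rw [← pvStars_zero, pvB_inv]
  simp only [List.nil_append, PySem.List.length_pyRange_one]
  have h1 : ((n + 1 : Int) - 1).toNat = n.toNat := by omega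
  rw [h1]
  apply List.map_congr_left
  intro k _
  congr 1
  omega

-- ===== VERDICT (by name: the statement is the Claim_ definition above) =====
theorem print_pattern_spec : Claim_equal_print_pattern := by
  intro n _
  unfold Spec_print_pattern
  rw [pvA_eq, pvB_eq]
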